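-- pv_equiv track=rewrite | github.com/ivaylospasov/programming-101 | week0/zero_insertion.py | zero_insert
-- ===== SOURCE A (Python) =====
-- def zero_insert(n):
--     digits_list = list(str(n))
--     index_list = []
--     for i in range(len(digits_list)):
--         if digits_list[i] == digits_list[i-1] or ((int(digits_list[i]) + int(digits_list[i-1])) % 10 == 0):
--             index_list.append(i)
--     index_list.sort(reverse=True)
--     for i in index_list:
--         digits_list.insert(i, '0')
--     n_with_zeros = int(''.join(digits_list))
--     return(n_with_zeros)
-- ===== SOURCE B (Python) =====
-- def zero_insert(n):
--     # single forward pass: carry the previous character (starting from the last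
--     # character, matching the first iteration's wraparound) and build the output directly
--     s = str(n)
--     out = []
--     prev = s[-1]
--     for c in s:
--         if c == prev or (int(c) + int(prev)) % 10 == 0:
--             out.append('0')
--         out.append(c)
--         prev = c
--     return int(''.join(out))
-- ===== Notes on version B (the rewrite author's own statement) =====
-- stated objective: simpler
-- what changed: Replaces the two-phase strategy (collect match indices, sort them in reverse, insert zeros by index) with a single forward pass that carries the previous character (initialised to the last character, matching the first iteration's wraparound) and appends to a fresh output list.
import Mathlib
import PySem

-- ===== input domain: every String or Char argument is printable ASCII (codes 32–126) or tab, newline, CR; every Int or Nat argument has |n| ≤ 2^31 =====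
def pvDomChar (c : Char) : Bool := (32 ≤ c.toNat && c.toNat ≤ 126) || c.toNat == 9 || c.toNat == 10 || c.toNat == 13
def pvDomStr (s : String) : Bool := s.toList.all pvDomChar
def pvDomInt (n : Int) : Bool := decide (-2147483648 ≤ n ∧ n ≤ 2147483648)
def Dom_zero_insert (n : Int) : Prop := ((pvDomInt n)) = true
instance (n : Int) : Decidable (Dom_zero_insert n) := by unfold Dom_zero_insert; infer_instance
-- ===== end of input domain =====

-- B replaces A's collect-indices / reverse-sort / insert-by-index phases with one forward
-- pass carrying the previous character and appending to a fresh list (simpler, same values).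


-- int(c) for a one-character string c (used only on digit characters under Pre_)
def pyIntChar (c : Char) : Int := (PySem.Int.ofChars? [c]).getD 0

-- ===== PORT A =====
-- A's branch test: digits_list[i] == digits_list[i-1] or (int(..i..) + int(..i-1..)) % 10 == 0
def zcondA (digits : List Char) (i : Int) : Bool :=
  (PySem.List.pyGetD digits i ' ' == PySem.List.pyGetD digits (i-1) ' ')
  || (PySem.Int.mod (pyIntChar (PySem.List.pyGetD digits i ' ')
        + pyIntChar (PySem.List.pyGetD digits (i-1) ' ')) 10 == 0)

def zero_insert (n : Int) : Int :=
  let digits_list := (PySem.Int.toStr n).toList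
  let index_list : List Int :=
    (PySem.List.pyRange 0 (PySem.List.len digits_list) 1).foldl
      (fun acc i => if zcondA digits_list i then acc ++ [i] else acc) []
  let sorted_desc := PySem.List.sorted index_list id true
  let digits2 := sorted_desc.foldl (fun ds i => PySem.List.insert ds i '0') digits_list
  (PySem.Int.ofChars? digits2).getD 0

-- ===== PORT B =====
-- B's branch test on the current character and the carried previous character
def zcondB (c p : Char) : Bool :=
  (c == p) || (PySem.Int.mod (pyIntChar c + pyIntChar p) 10 == 0)

def zero_insert_alt (n : Int) : Int :=
  let s := (PySem.Int.toStr n).toList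
  let res := s.foldl
    (fun (st : List Char × Char) c =>
      ((if zcondB c st.2 then st.1 ++ ['0'] else st.1) ++ [c], c))
    ([], PySem.List.pyGetD s (-1) ' ')
  (PySem.Int.ofChars? res.1).getD 0

-- ===== PRECONDITION & SPEC =====
-- A raises ValueError for n < 0 (int('-') on the sign character), so Pre_ admits exactly n ≥ 0.
def Pre_zero_insert (n : Int) : Prop := 0 ≤ n
instance (n : Int) : Decidable (Pre_zero_insert n) := by unfold Pre_zero_insert; infer_instance
def pvWitness_zero_insert : Int := 8

def Spec_zero_insert (n : Int) (out : Int) : Prop := out = zero_insert_alt n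
instance (n : Int) (out : Int) : Decidable (Spec_zero_insert n out) := by unfold Spec_zero_insert; infer_instance

-- ===== CLAIM (what is proved, stated in full; the proofs are below) =====
def Claim_equal_zero_insert : Prop := ∀ (n : Int), Dom_zero_insert n → Pre_zero_insert n → Spec_zero_insert n (zero_insert n)

-- ===== LEMMAS AND PROOFS =====

-- the interleaving A produces: before each selected position a '0', then the character
def zmerge (P : Int → Bool) (xs : List Char) : List Char :=
  (PySem.List.enumerate xs 0).flatMap (fun q => (if P q.1 then ['0'] else []) ++ [q.2])

theorem zmerge_nil (P : Int → Bool) : zmerge P [] = [] := rfl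

theorem zmerge_append_singleton (P : Int → Bool) (xs : List Char) (x : Char) :
    zmerge P (xs ++ [x]) = zmerge P xs ++ ((if P (xs.length : Int) then ['0'] else []) ++ [x]) := by
  simp [zmerge, PySem.List.enumerate_append, PySem.List.enumerate_cons, PySem.List.enumerate_nil]

theorem insert_fold (P : Int → Bool) : ∀ (m : Nat) (cs : List Char), m ≤ cs.length →
    (((PySem.List.pyRange 0 (m : Int) 1).filter P).reverse).foldl
        (fun ds i => PySem.List.insert ds i '0') cs
      = zmerge P (cs.take m) ++ cs.drop m := by
  intro m
  induction m with
  | zero => intro cs _; simp [PySem.List.pyRange_one_eq_nil, zmerge_nil]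
  | succ m ih =>
    intro cs hm
    have hr : PySem.List.pyRange 0 ((m + 1 : Nat) : Int) 1
        = PySem.List.pyRange 0 (m : Int) 1 ++ [(m : Int)] := by
      push_cast
      exact PySem.List.pyRange_one_succ_right (by positivity)
    have hmle : m ≤ cs.length := Nat.le_of_succ_le hm
    have hmlt : m < cs.length := hm
    have htake : cs.take (m + 1) = cs.take m ++ [cs[m]] := by
      rw [List.take_add_one, List.getElem?_eq_getElem hmlt]
      rfl
    have hdrop : cs.drop m = cs[m] :: cs.drop (m + 1) := List.drop_eq_getElem_cons hmlt
    have hlen : (cs.take m).length = m := List.length_take_of_le hmle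
    rw [hr, List.filter_append, List.reverse_append, List.foldl_append]
    by_cases hP : P (m : Int) = true
    · have h1 : (List.filter P [(m : Int)]).reverse = [(m : Int)] := by simp [hP]
      rw [h1]
      have h2 : List.foldl (fun ds i => PySem.List.insert ds i '0') cs [(m : Int)]
          = cs.take m ++ '0' :: cs.drop m := by
        simp [PySem.List.insert_natCast cs m '0' hmle]
      rw [h2, ih (cs.take m ++ '0' :: cs.drop m) (by simp; omega)]
      rw [List.take_append_of_le_length (by omega), List.take_take,
          List.drop_append_of_le_length (by omega)]
      rw [htake, zmerge_append_singleton, hlen]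
      have hd : (cs.take m).drop m = [] := by
        rw [List.drop_eq_nil_iff]
        omega
      rw [hd, hdrop]
      simp [hP]
    · have h1 : (List.filter P [(m : Int)]).reverse = [] := by simp [hP]
      rw [h1]
      simp only [List.foldl_nil]
      rw [ih cs hmle]
      rw [htake, zmerge_append_singleton, hlen, hdrop]
      simp [hP]

theorem B_fold : ∀ (xs out : List Char) (p : Char),
    (xs.foldl (fun (st : List Char × Char) c =>
        ((if zcondB c st.2 then st.1 ++ ['0'] else st.1) ++ [c], c)) (out, p)).1
    = out ++ (xs.zip (p :: xs)).flatMap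
        (fun q => (if zcondB q.1 q.2 then ['0'] else []) ++ [q.1]) := by
  intro xs
  induction xs with
  | nil => intro out p; simp
  | cons c t ih =>
    intro out p
    simp only [List.foldl_cons, List.zip_cons_cons, List.flatMap_cons]
    rw [ih]
    by_cases h : zcondB c p = true <;> simp [h]

theorem zmerge_eq_zip (cs : List Char) :
    zmerge (zcondA cs) cs
      = (cs.zip (PySem.List.pyGetD cs (-1) ' ' :: cs)).flatMap
          (fun q => (if zcondB q.1 q.2 then ['0'] else []) ++ [q.1]) := by
  unfold zmerge
  rw [List.flatMap_def, List.flatMap_def]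
  congr 1
  apply List.ext_getElem
  · simp [PySem.List.length_enumerate]
  · intro k h1 h2
    have hk : k < cs.length := by simpa [PySem.List.length_enumerate] using h1
    have henl : k < (PySem.List.enumerate cs 0).length := by
      simpa [PySem.List.length_enumerate] using hk
    have hzl : k < (cs.zip (PySem.List.pyGetD cs (-1) ' ' :: cs)).length := by
      simp [List.length_zip]
      omega
    simp only [List.getElem_map, PySem.List.getElem_enumerate cs 0 k henl, List.getElem_zip]
    have hcur : PySem.List.pyGetD cs ((0 : Int) + (k : Int)) ' ' = cs[k] := by
      rw [zero_add, PySem.List.pyGetD_natCast, List.getD_eq_getElem _ _ hk]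
    have hprev : PySem.List.pyGetD cs ((0 : Int) + (k : Int) - 1) ' '
        = (PySem.List.pyGetD cs (-1) ' ' :: cs)[k]'(by simp; omega) := by
      cases k with
      | zero => norm_num
      | succ j =>
        have hj : j < cs.length := Nat.lt_of_succ_lt hk
        rw [show ((0:Int) + ((j+1 : Nat) : Int) - 1) = ((j : Nat) : Int) by push_cast; ring,
            PySem.List.pyGetD_natCast, List.getD_eq_getElem _ _ hj, List.getElem_cons_succ]
    simp only [zcondA, zcondB, hcur, hprev]
    rfl

theorem zero_insert_eq (n : Int) : zero_insert n = zero_insert_alt n := by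
  unfold zero_insert zero_insert_alt
  set cs := (PySem.Int.toStr n).toList with hcs
  have hfilter : (PySem.List.pyRange 0 (PySem.List.len cs) 1).foldl
      (fun acc i => if zcondA cs i then acc ++ [i] else acc) []
      = (PySem.List.pyRange 0 (cs.length : Int) 1).filter (zcondA cs) := by
    rw [PySem.List.len_eq]
    exact PySem.List.foldl_append_if_eq_filter (zcondA cs) _ []
  have hpw : ((PySem.List.pyRange 0 (cs.length : Int) 1).filter (zcondA cs)).Pairwise (· < ·) :=
    (PySem.List.pairwise_lt_pyRange_one 0 (cs.length : Int)).filter _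
  have hsorted : PySem.List.sorted
        ((PySem.List.pyRange 0 (cs.length : Int) 1).filter (zcondA cs)) id true
      = ((PySem.List.pyRange 0 (cs.length : Int) 1).filter (zcondA cs)).reverse := by
    apply PySem.List.sorted_rev_eq_of_perm_of_pairwise_gt
    · exact (List.reverse_perm _)
    · exact (List.pairwise_reverse).mpr (by simpa using hpw)
  simp only [hfilter, hsorted]
  rw [insert_fold (zcondA cs) cs.length cs (le_refl _)]
  rw [List.take_length, List.drop_length, List.append_nil]
  rw [zmerge_eq_zip, B_fold]
  simp

-- ===== VERDICT (by name: the statement is the Claim_ definition above) =====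
theorem zero_insert_spec : Claim_equal_zero_insert := by
  intro n _ _
  unfold Spec_zero_insert
  exact zero_insert_eq n
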